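-- pv_equiv track=rewrite | github.com/sebastiansgz/ejercicios_python | Clase03/tablamult.py | obtener_filas
-- ===== SOURCE A (Python) =====
-- def suma_tuplas(tupla1, tupla2):                            # Tengo una funcion que le doy dos tuplas con numeros y las suma.
--     return tuple(a + b for a, b in zip(tupla1, tupla2))
--
-- def obtener_filas(nums_1,nums_n):                           #Obtengo las filas para DESPUES armar la tabla
--     filas_tabla = []
--     filas_tabla.append(nums_0)
--     filas_tabla.append(nums_n)
--     for i in range(0,8):
--         nums_n = suma_tuplas(nums_1, nums_n)
--         filas_tabla.append(nums_n)
--     return filas_tabla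
--
-- nums_0 = (0, 0, 0, 0, 0, 0, 0, 0, 0, 0)                              # Estado inical
--
-- nums_1 = (0, 1, 2, 3, 4, 5, 6, 7, 8, 9)                              # Esto debe ser una constante que se suma.
--
-- nums_n = suma_tuplas(nums_0, nums_1)
--
-- filas_tabla = obtener_filas(nums_1,nums_n)
-- ===== SOURCE B (Python) =====
-- nums_0 = (0, 0, 0, 0, 0, 0, 0, 0, 0, 0)
--
-- def obtener_filas(nums_1, nums_n):
--     # closed form: row i (i = 1..8 after the two fixed rows) is nums_n + i*nums_1, elementwise
--     return [nums_0, nums_n] + [tuple(n + i * u for n, u in zip(nums_n, nums_1))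
--                                for i in range(1, 9)]
-- ===== Notes on version B (the rewrite author's own statement) =====
-- stated objective: alternative
-- what changed: Each row is computed independently by the closed form nums_n + i*nums_1 (elementwise) instead of chaining eight successive suma_tuplas additions on a running tuple.
import Mathlib
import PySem

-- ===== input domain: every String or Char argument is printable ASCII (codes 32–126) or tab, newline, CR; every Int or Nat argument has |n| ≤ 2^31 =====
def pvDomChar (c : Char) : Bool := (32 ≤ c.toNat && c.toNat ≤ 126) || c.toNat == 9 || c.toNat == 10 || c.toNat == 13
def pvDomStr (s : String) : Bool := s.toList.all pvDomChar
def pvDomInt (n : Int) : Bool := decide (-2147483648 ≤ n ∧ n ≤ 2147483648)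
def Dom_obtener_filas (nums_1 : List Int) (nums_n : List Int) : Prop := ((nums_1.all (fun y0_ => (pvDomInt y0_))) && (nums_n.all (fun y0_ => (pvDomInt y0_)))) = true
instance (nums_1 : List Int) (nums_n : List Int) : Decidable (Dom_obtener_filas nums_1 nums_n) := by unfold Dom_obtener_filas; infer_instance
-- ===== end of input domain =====

-- B replaces A's chained row-to-row additions by an independent closed form per row (nums_n + i*nums_1); alternative decomposition, same cost.

-- ===== PORT A =====
-- global constant nums_0 from the module (estado inicial)
def nums_0_const : List Int := [0, 0, 0, 0, 0, 0, 0, 0, 0, 0]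

def suma_tuplas (tupla1 : List Int) (tupla2 : List Int) : List Int :=
  (tupla1.zip tupla2).map (fun p => p.1 + p.2)

def obtener_filas (nums_1 : List Int) (nums_n : List Int) : List (List Int) :=
  let filas_tabla : List (List Int) := []
  let filas_tabla := filas_tabla ++ [nums_0_const]
  let filas_tabla := filas_tabla ++ [nums_n]
  let st := (List.range 8).foldl
    (fun (st : List (List Int) × List Int) _ =>
      let nn := suma_tuplas nums_1 st.2
      (st.1 ++ [nn], nn))
    (filas_tabla, nums_n)
  st.1

-- ===== PORT B =====
-- one line in Source B: [nums_0, nums_n] plus eight independently computed rows nums_n + i*nums_1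
def obtener_filas_alt (nums_1 : List Int) (nums_n : List Int) : List (List Int) :=
  [nums_0_const, nums_n] ++
    (PySem.List.pyRange 1 9 1).map
      (fun i => (nums_n.zip nums_1).map (fun p => p.1 + i * p.2))

-- ===== PRECONDITION & SPEC =====
def Spec_obtener_filas (nums_1 : List Int) (nums_n : List Int) (out : List (List Int)) : Prop := out = obtener_filas_alt nums_1 nums_n
instance (nums_1 : List Int) (nums_n : List Int) (out : List (List Int)) : Decidable (Spec_obtener_filas nums_1 nums_n out) := by unfold Spec_obtener_filas; infer_instance

-- ===== CLAIM (what is proved, stated in full; the proofs are below) =====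
def Claim_equal_obtener_filas : Prop := ∀ (nums_1 : List Int) (nums_n : List Int), Dom_obtener_filas nums_1 nums_n → Spec_obtener_filas nums_1 nums_n (obtener_filas nums_1 nums_n)

-- ===== LEMMAS AND PROOFS =====
lemma suma_base (u n : List Int) :
    suma_tuplas u n = (n.zip u).map (fun p => p.1 + 1 * p.2) := by
  induction u generalizing n with
  | nil => cases n <;> simp [suma_tuplas]
  | cons a t ih =>
    cases n with
    | nil => simp [suma_tuplas]
    | cons b s =>
      simp only [suma_tuplas, List.zip_cons_cons, List.map_cons, List.cons.injEq]
      exact ⟨by ring, by simpa [suma_tuplas] using ih s⟩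

lemma suma_step (u n : List Int) (k : Int) :
    suma_tuplas u ((n.zip u).map (fun p => p.1 + k * p.2)) =
      (n.zip u).map (fun p => p.1 + (k + 1) * p.2) := by
  induction u generalizing n with
  | nil => cases n <;> simp [suma_tuplas]
  | cons a t ih =>
    cases n with
    | nil => simp [suma_tuplas]
    | cons b s =>
      simp only [suma_tuplas, List.zip_cons_cons, List.map_cons, List.cons.injEq]
      exact ⟨by ring, by simpa [suma_tuplas] using ih s⟩

lemma pyRange_1_9 : PySem.List.pyRange 1 9 1 = [1, 2, 3, 4, 5, 6, 7, 8] := by decide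

-- ===== VERDICT (by name: the statement is the Claim_ definition above) =====
theorem obtener_filas_spec : Claim_equal_obtener_filas := by
  intro nums_1 nums_n _
  show obtener_filas nums_1 nums_n = obtener_filas_alt nums_1 nums_n
  simp only [obtener_filas, obtener_filas_alt, pyRange_1_9, List.map_cons, List.map_nil,
    List.range_succ, List.foldl_append, List.foldl_cons, List.foldl_nil, List.range_zero]
  rw [suma_base nums_1 nums_n,
      suma_step nums_1 nums_n (1),
      suma_step nums_1 nums_n (1 + 1),
      suma_step nums_1 nums_n (1 + 1 + 1),
      suma_step nums_1 nums_n (1 + 1 + 1 + 1),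
      suma_step nums_1 nums_n (1 + 1 + 1 + 1 + 1),
      suma_step nums_1 nums_n (1 + 1 + 1 + 1 + 1 + 1),
      suma_step nums_1 nums_n (1 + 1 + 1 + 1 + 1 + 1 + 1)]
  norm_num
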